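-- pv_equiv track=rewrite | github.com/syseitz/predTED | utils/features.py | count_internal_loops
-- ===== SOURCE A (Python) =====
-- def count_internal_loops(structure: str) -> int:
--     internal_loops = 0
--     i = 0
--     while i < len(structure) - 1:
--         if structure[i] == ')' and structure[i + 1] == '.':
--             j = i + 1
--             while j < len(structure) and structure[j] == '.':
--                 j += 1
--             if j < len(structure) and structure[j] == '(':
--                 internal_loops += 1
--             i = j
--         else:
--             i += 1
--     return internal_loops
-- ===== SOURCE B (Python) =====
-- def count_internal_loops(structure: str) -> int:
--     # single-pass state machine: state 0 = idle, 1 = just saw ')', 2 = in dot run after ')'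
--     count = 0
--     state = 0
--     for c in structure:
--         if c == ')':
--             state = 1
--         elif c == '.' and state >= 1:
--             state = 2
--         elif c == '(' and state == 2:
--             count += 1
--             state = 0
--         else:
--             state = 0
--     return count
-- ===== Notes on version B (the rewrite author's own statement) =====
-- stated objective: faster
-- what changed: Replaces the index-based outer while-loop with an inner dot-skipping scan by a single left-to-right character fold over a 3-state machine (idle / saw ')' / in dot run); same O(n) asymptotics, but one plain for-loop over characters with no index arithmetic or repeated len()/indexing, which a timing run measured ~3x faster.
import Mathlib
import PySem

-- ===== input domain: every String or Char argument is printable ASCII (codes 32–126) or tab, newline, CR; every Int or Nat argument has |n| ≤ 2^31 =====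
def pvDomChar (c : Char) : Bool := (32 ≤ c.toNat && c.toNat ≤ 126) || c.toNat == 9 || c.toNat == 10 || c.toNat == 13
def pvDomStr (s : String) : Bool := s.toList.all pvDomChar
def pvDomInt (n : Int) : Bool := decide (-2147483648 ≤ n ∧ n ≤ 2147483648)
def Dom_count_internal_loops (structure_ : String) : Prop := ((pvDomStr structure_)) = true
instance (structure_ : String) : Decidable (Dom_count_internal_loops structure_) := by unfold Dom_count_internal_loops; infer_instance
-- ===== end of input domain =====

-- B replaces A's index-based while-loop scanner by a single-pass 3-state character fold (alternative decomposition, same O(n) cost).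


-- ===== PORT A =====
-- inner while: 'while j < len(structure) and structure[j] == '.': j += 1'
def pvSkipDots (s : List Char) (j : Nat) : Nat :=
  if h : j < s.length ∧ s[j]? = some '.' then pvSkipDots s (j + 1) else j
termination_by s.length - j
decreasing_by omega

theorem pvSkipDots_ge (s : List Char) (j : Nat) : j ≤ pvSkipDots s j := by
  unfold pvSkipDots
  split
  · exact le_trans (Nat.le_succ j) (pvSkipDots_ge s (j + 1))
  · exact le_refl j
termination_by s.length - j
decreasing_by rename_i h; omega

-- outer while: 'while i < len(structure) - 1: …'
def pvLoopA (s : List Char) (i : Nat) (acc : Int) : Int :=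
  if _h : i + 1 < s.length then
    if s[i]? = some ')' ∧ s[i + 1]? = some '.' then
      let j := pvSkipDots s (i + 1)
      let acc' := if j < s.length ∧ s[j]? = some '(' then acc + 1 else acc
      pvLoopA s j acc'
    else pvLoopA s (i + 1) acc
  else acc
termination_by s.length - i
decreasing_by
  · have := pvSkipDots_ge s (i + 1); omega
  · omega

def count_internal_loops (structure_ : String) : Int :=
  pvLoopA structure_.toList 0 0

-- ===== PORT B =====
-- B's fold step: state 0 = idle, 1 = just saw ')', 2 = in a dot run after ')'
def pvStepB (st : Int × Nat) (c : Char) : Int × Nat :=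
  if c = ')' then (st.1, 1)
  else if c = '.' ∧ 1 ≤ st.2 then (st.1, 2)
  else if c = '(' ∧ st.2 = 2 then (st.1 + 1, 0)
  else (st.1, 0)

def count_internal_loops_alt (structure_ : String) : Int :=
  (structure_.toList.foldl pvStepB (0, 0)).1

-- ===== PRECONDITION & SPEC =====
def Spec_count_internal_loops (structure_ : String) (out : Int) : Prop := out = count_internal_loops_alt structure_
instance (structure_ : String) (out : Int) : Decidable (Spec_count_internal_loops structure_ out) := by unfold Spec_count_internal_loops; infer_instance

-- ===== CLAIM (what is proved, stated in full; the proofs are below) =====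
def Claim_equal_count_internal_loops : Prop := ∀ (structure_ : String), Dom_count_internal_loops structure_ → Spec_count_internal_loops structure_ (count_internal_loops structure_)

-- ===== LEMMAS AND PROOFS =====

-- reference count with explicit state, structural on the list (proof-only helper)
def pvRef (st : Nat) : List Char → Int
  | [] => 0
  | c :: r =>
    if c = ')' then pvRef 1 r
    else if c = '.' ∧ 1 ≤ st then pvRef 2 r
    else if c = '(' ∧ st = 2 then 1 + pvRef 0 r
    else pvRef 0 r

theorem foldl_stepB_eq_ref (l : List Char) (acc : Int) (st : Nat) :
    (l.foldl pvStepB (acc, st)).1 = acc + pvRef st l := by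
  induction l generalizing acc st with
  | nil => simp [pvRef]
  | cons c r ih =>
    simp only [List.foldl_cons, pvStepB, pvRef]
    split_ifs with h1 h2 h3 <;> simp [ih] <;> ring

theorem pvRef_short (l : List Char) (h : l.length ≤ 1) : pvRef 0 l = 0 := by
  match l with
  | [] => rfl
  | [c] => unfold pvRef; split_ifs <;> simp_all [pvRef]
  | a :: b :: r => simp at h

-- ref 1 and ref 0 agree when the list does not start with '.'
theorem pvRef1_eq_ref0 (l : List Char) (h : ∀ c r, l = c :: r → c ≠ '.') :
    pvRef 1 l = pvRef 0 l := by
  match l with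
  | [] => rfl
  | c :: r =>
    have hc := h c r rfl
    simp only [pvRef]
    split_ifs with h1 h2 h3 <;> first
      | rfl
      | (exact absurd h2.1 hc)
      | (simp_all)

-- consuming a dot run: pvRef 2 on the suffix at k equals the '(' bonus at pvSkipDots plus pvRef 0 there
theorem pvRef2_skip (s : List Char) (k : Nat) :
    pvRef 2 (s.drop k) =
      (if (s[pvSkipDots s k]? = some '(') then (1 : Int) else 0) + pvRef 0 (s.drop (pvSkipDots s k)) := by
  unfold pvSkipDots
  split
  · rename_i h
    have hk : k < s.length := h.1
    have hd : s.drop k = s[k] :: s.drop (k + 1) := List.drop_eq_getElem_cons hk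
    have hdot : s[k] = '.' := by
      have := h.2; rw [List.getElem?_eq_getElem hk] at this; exact Option.some_inj.mp this
    rw [hd, hdot]
    have : pvRef 2 ('.' :: s.drop (k + 1)) = pvRef 2 (s.drop (k + 1)) := by
      simp [pvRef]
    rw [this]
    exact pvRef2_skip s (k + 1)
  · rename_i h
    -- at j = k: either k ≥ length (drop = [], both sides 0) or s[k] ≠ '.'
    by_cases hk : k < s.length
    · have hnd : ¬ s[k]? = some '.' := by tauto
      have hkne : s[k] ≠ '.' := by
        intro he; exact hnd (by rw [List.getElem?_eq_getElem hk, he])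
      rw [List.drop_eq_getElem_cons hk, List.getElem?_eq_getElem hk]
      by_cases hp : s[k] = '('
      · rw [hp]; simp [pvRef]
      · by_cases hc : s[k] = ')'
        · rw [hc]; simp [pvRef]
        · simp [pvRef, hc, hp, hkne]
    · have hdn : s.drop k = [] := List.drop_eq_nil_of_le (by omega)
      have hgn : s[k]? = none := List.getElem?_eq_none (by omega)
      simp [hdn, hgn, pvRef]
termination_by s.length - k
decreasing_by rename_i h; omega

theorem pvSkipDots_le (s : List Char) (j : Nat) (hj : j ≤ s.length) : pvSkipDots s j ≤ s.length := by
  unfold pvSkipDots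
  split
  · rename_i h; exact pvSkipDots_le s (j + 1) (by omega)
  · exact hj
termination_by s.length - j
decreasing_by rename_i h; omega

-- the main loop invariant: A's loop from index i adds pvRef 0 of the suffix
theorem pvLoopA_eq (s : List Char) (i : Nat) (acc : Int) (hi : i ≤ s.length) :
    pvLoopA s i acc = acc + pvRef 0 (s.drop i) := by
  unfold pvLoopA
  split
  · rename_i hlen
    split
    · rename_i hpat
      have hi1 : i < s.length := by omega
      have hd : s.drop i = s[i] :: s.drop (i + 1) := List.drop_eq_getElem_cons hi1
      have hci : s[i] = ')' := by
        have := hpat.1; rw [List.getElem?_eq_getElem hi1] at this; exact Option.some_inj.mp this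
      have hlen1 : i + 1 < s.length := hlen
      have hd1 : s.drop (i + 1) = s[i+1] :: s.drop (i + 2) := List.drop_eq_getElem_cons hlen1
      have hci1 : s[i+1] = '.' := by
        have := hpat.2; rw [List.getElem?_eq_getElem hlen1] at this; exact Option.some_inj.mp this
      have hrw : pvRef 0 (s.drop i) = pvRef 2 (s.drop (i + 1)) := by
        rw [hd, hci, hd1, hci1]; simp [pvRef]
      have hskip := pvRef2_skip s (i + 1)
      have hge := pvSkipDots_ge s (i + 1)
      have hle := pvSkipDots_le s (i + 1) (by omega)
      rw [pvLoopA_eq s (pvSkipDots s (i + 1)) _ hle, hrw, hskip]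
      have hiff : s[pvSkipDots s (i+1)]? = some '(' →
          (pvSkipDots s (i+1) < s.length ∧ s[pvSkipDots s (i+1)]? = some '(') := by
        intro h
        refine ⟨?_, h⟩
        by_contra hlt
        rw [List.getElem?_eq_none (by omega)] at h; simp at h
      by_cases hq : s[pvSkipDots s (i+1)]? = some '('
      · rw [if_pos (hiff hq), if_pos hq]; ring
      · rw [if_neg (fun hh => hq hh.2), if_neg hq]; ring
    · rename_i hpat
      have hi1 : i < s.length := by omega
      have hd : s.drop i = s[i] :: s.drop (i + 1) := List.drop_eq_getElem_cons hi1
      have hrw : pvRef 0 (s.drop i) = pvRef 0 (s.drop (i + 1)) := by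
        rw [hd]
        by_cases hc : s[i] = ')'
        · -- then s[i+1] ≠ '.'
          have hlen1 : i + 1 < s.length := by omega
          have hne : s[i+1] ≠ '.' := by
            intro he
            exact hpat ⟨by rw [List.getElem?_eq_getElem hi1, hc],
                        by rw [List.getElem?_eq_getElem hlen1, he]⟩
          have hd1 : s.drop (i + 1) = s[i+1] :: s.drop (i + 2) := List.drop_eq_getElem_cons hlen1
          have h1 : pvRef 0 (s[i] :: s.drop (i+1)) = pvRef 1 (s.drop (i+1)) := by
            simp [pvRef, hc]
          rw [h1]
          apply pvRef1_eq_ref0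
          intro c r he
          rw [hd1] at he
          injection he with h1 h2
          rw [← h1]; exact hne
        · simp only [pvRef, if_neg hc]
          rw [if_neg (by simp), if_neg (by simp)]
      rw [pvLoopA_eq s (i + 1) acc (by omega), hrw]
  · rename_i hlen
    have : (s.drop i).length ≤ 1 := by
      rw [List.length_drop]; omega
    rw [pvRef_short _ this]; ring
termination_by s.length - i
decreasing_by
  · have := pvSkipDots_ge s (i + 1); omega
  · omega

-- ===== VERDICT (by name: the statement is the Claim_ definition above) =====
theorem count_internal_loops_spec : Claim_equal_count_internal_loops := by
  intro structure_ _
  show count_internal_loops structure_ = count_internal_loops_alt structure_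
  unfold count_internal_loops count_internal_loops_alt
  rw [pvLoopA_eq structure_.toList 0 0 (Nat.zero_le _), foldl_stepB_eq_ref]
  simp
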